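-- pv_equiv track=rewrite | github.com/Master2-IAFA/65307369 | Data Integration/Data_Integration.py | projection
-- ===== SOURCE A (Python) =====
-- def projection(list_api_1, list_api_2, list_api_3, list_api_4,Query):
--     start, end = 'SELECT', 'FROM'
--     cols_in_query=Query[Query.find(start)+len(start):Query.rfind(end)].strip().split(', ')
--     list_api1, list_api2, list_api3, list_api4 = [], [], [], []
--     for word in cols_in_query:
--         if (word in list_api_1) and (word in list_api_2) and (word in list_api_3) and (word in list_api_4):
--             list_api1.append(word), list_api2.append(word)
--             list_api3.append(word), list_api4.append(word)
--
--         elif (word in list_api_1) and (word in list_api_2) and (word in list_api_3):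
--             list_api1.append(word), list_api2.append(word), list_api3.append(word)
--         elif (word in list_api_1) and (word in list_api_2) and (word in list_api_4):
--             list_api1.append(word), list_api2.append(word), list_api4.append(word)
--         elif (word in list_api_1) and (word in list_api_3) and (word in list_api_4):
--             list_api1.append(word), list_api3.append(word), list_api4.append(word)
--         elif (word in list_api_2) and (word in list_api_3) and (word in list_api_4):
--             list_api2.append(word), list_api3.append(word), list_api4.append(word)
--
--         elif (word in list_api_1) and (word in list_api_2):
--             list_api1.append(word), list_api2.append(word)
--         elif (word in list_api_1) and (word in list_api_3):
--             list_api1.append(word), list_api3.append(word)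
--         elif (word in list_api_1) and (word in list_api_4):
--             list_api1.append(word), list_api4.append(word)
--
--         elif (word in list_api_2) and (word in list_api_3):
--             list_api2.append(word), list_api3.append(word)
--         elif (word in list_api_2) and (word in list_api_4):
--             list_api2.append(word), list_api4.append(word)
--
--         elif (word in list_api_3) and (word in list_api_4):
--             list_api3.append(word), list_api4.append(word)
--
--         elif (word in list_api_1):
--             list_api1.append(word)
--         elif (word in list_api_2) :
--             list_api2.append(word)
--         elif (word in list_api_3) :
--             list_api3.append(word)
--         else:
--             list_api4.append(word)
--
--
--     return list_api1, list_api2, list_api3, list_api4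
-- ===== SOURCE B (Python) =====
-- def projection(list_api_1, list_api_2, list_api_3, list_api_4, Query):
--     start, end = 'SELECT', 'FROM'
--     cols_in_query = Query[Query.find(start)+len(start):Query.rfind(end)].strip().split(', ')
--     # One filter pass per output list instead of a 16-way elif chain:
--     # a word goes to list k iff it is a member of list_api_k; list 4
--     # additionally collects every word that belongs to no list at all.
--     return (
--         [w for w in cols_in_query if w in list_api_1],
--         [w for w in cols_in_query if w in list_api_2],
--         [w for w in cols_in_query if w in list_api_3],
--         [w for w in cols_in_query if w in list_api_4
--          or (w not in list_api_1 and w not in list_api_2 and w not in list_api_3)],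
--     )
-- ===== Notes on version B (the rewrite author's own statement) =====
-- stated objective: simpler
-- what changed: Replaces the per-word 16-branch elif chain over membership combinations by four independent filter passes (one comprehension per output list), with list 4 also catching words in no list.
import Mathlib
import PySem

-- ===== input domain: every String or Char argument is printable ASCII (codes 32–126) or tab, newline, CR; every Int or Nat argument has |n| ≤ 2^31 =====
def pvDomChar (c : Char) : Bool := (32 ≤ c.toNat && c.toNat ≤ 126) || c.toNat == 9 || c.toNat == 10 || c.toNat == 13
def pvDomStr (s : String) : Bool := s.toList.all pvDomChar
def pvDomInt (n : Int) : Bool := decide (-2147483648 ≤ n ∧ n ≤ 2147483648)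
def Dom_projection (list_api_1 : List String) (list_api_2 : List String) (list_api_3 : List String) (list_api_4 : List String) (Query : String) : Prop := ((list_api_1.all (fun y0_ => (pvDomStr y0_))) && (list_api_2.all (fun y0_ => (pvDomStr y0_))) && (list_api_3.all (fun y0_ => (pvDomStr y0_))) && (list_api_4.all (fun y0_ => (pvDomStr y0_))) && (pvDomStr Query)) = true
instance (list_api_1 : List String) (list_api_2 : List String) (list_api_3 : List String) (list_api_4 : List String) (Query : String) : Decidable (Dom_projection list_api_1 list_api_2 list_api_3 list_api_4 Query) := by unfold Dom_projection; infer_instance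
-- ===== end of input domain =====

-- B replaces A's 16-branch per-word elif chain by four independent filter passes (objective: simpler).


-- ===== PORT A =====
-- cols_in_query = Query[Query.find('SELECT')+6 : Query.rfind('FROM')].strip().split(', ')
def projectionCols (Query : String) : List String :=
  ((PySem.Str.split?
    (PySem.Str.strip
      (PySem.Str.slice Query (some (PySem.Str.find Query "SELECT" + 6))
                             (some (PySem.Str.rfind Query "FROM"))))
    ", ").getD [])  -- sep ", " ≠ "", so split? is some; .getD [] is exact

-- the body of A's for-loop: the full elif chain over the four accumulators
def projectionStep (L1 L2 L3 L4 : List String)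
    (s : List String × List String × List String × List String) (word : String) :
    List String × List String × List String × List String :=
  let (l1, l2, l3, l4) := s
  if word ∈ L1 ∧ word ∈ L2 ∧ word ∈ L3 ∧ word ∈ L4 then
    (l1 ++ [word], l2 ++ [word], l3 ++ [word], l4 ++ [word])
  else if word ∈ L1 ∧ word ∈ L2 ∧ word ∈ L3 then (l1 ++ [word], l2 ++ [word], l3 ++ [word], l4)
  else if word ∈ L1 ∧ word ∈ L2 ∧ word ∈ L4 then (l1 ++ [word], l2 ++ [word], l3, l4 ++ [word])
  else if word ∈ L1 ∧ word ∈ L3 ∧ word ∈ L4 then (l1 ++ [word], l2, l3 ++ [word], l4 ++ [word])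
  else if word ∈ L2 ∧ word ∈ L3 ∧ word ∈ L4 then (l1, l2 ++ [word], l3 ++ [word], l4 ++ [word])
  else if word ∈ L1 ∧ word ∈ L2 then (l1 ++ [word], l2 ++ [word], l3, l4)
  else if word ∈ L1 ∧ word ∈ L3 then (l1 ++ [word], l2, l3 ++ [word], l4)
  else if word ∈ L1 ∧ word ∈ L4 then (l1 ++ [word], l2, l3, l4 ++ [word])
  else if word ∈ L2 ∧ word ∈ L3 then (l1, l2 ++ [word], l3 ++ [word], l4)
  else if word ∈ L2 ∧ word ∈ L4 then (l1, l2 ++ [word], l3, l4 ++ [word])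
  else if word ∈ L3 ∧ word ∈ L4 then (l1, l2, l3 ++ [word], l4 ++ [word])
  else if word ∈ L1 then (l1 ++ [word], l2, l3, l4)
  else if word ∈ L2 then (l1, l2 ++ [word], l3, l4)
  else if word ∈ L3 then (l1, l2, l3 ++ [word], l4)
  else (l1, l2, l3, l4 ++ [word])

def projection (list_api_1 : List String) (list_api_2 : List String) (list_api_3 : List String) (list_api_4 : List String) (Query : String) : List String × List String × List String × List String :=
  (projectionCols Query).foldl (projectionStep list_api_1 list_api_2 list_api_3 list_api_4)
    ([], [], [], [])

-- ===== PORT B =====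
def projection_alt (list_api_1 : List String) (list_api_2 : List String) (list_api_3 : List String) (list_api_4 : List String) (Query : String) : List String × List String × List String × List String :=
  let cols := ((PySem.Str.split?
    (PySem.Str.strip
      (PySem.Str.slice Query (some (PySem.Str.find Query "SELECT" + 6))
                             (some (PySem.Str.rfind Query "FROM"))))
    ", ").getD [])  -- sep ", " ≠ "", so split? is some; .getD [] is exact
  (cols.filter (fun w => decide (w ∈ list_api_1)),
   cols.filter (fun w => decide (w ∈ list_api_2)),
   cols.filter (fun w => decide (w ∈ list_api_3)),
   cols.filter (fun w => decide (w ∈ list_api_4 ∨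
     (w ∉ list_api_1 ∧ w ∉ list_api_2 ∧ w ∉ list_api_3))))

-- ===== PRECONDITION & SPEC =====
def Spec_projection (list_api_1 : List String) (list_api_2 : List String) (list_api_3 : List String) (list_api_4 : List String) (Query : String) (out : List String × List String × List String × List String) : Prop := out = projection_alt list_api_1 list_api_2 list_api_3 list_api_4 Query
instance (list_api_1 : List String) (list_api_2 : List String) (list_api_3 : List String) (list_api_4 : List String) (Query : String) (out : List String × List String × List String × List String) : Decidable (Spec_projection list_api_1 list_api_2 list_api_3 list_api_4 Query out) := by unfold Spec_projection; infer_instance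

-- ===== CLAIM (what is proved, stated in full; the proofs are below) =====
def Claim_equal_projection : Prop := ∀ (list_api_1 : List String) (list_api_2 : List String) (list_api_3 : List String) (list_api_4 : List String) (Query : String), Dom_projection list_api_1 list_api_2 list_api_3 list_api_4 Query → Spec_projection list_api_1 list_api_2 list_api_3 list_api_4 Query (projection list_api_1 list_api_2 list_api_3 list_api_4 Query)

-- ===== LEMMAS AND PROOFS =====

-- A's fold, started from arbitrary accumulators, appends exactly B's four filters.
theorem projection_loop_eq (L1 L2 L3 L4 : List String) (cols a b c d : List String) :
    cols.foldl (projectionStep L1 L2 L3 L4) (a, b, c, d) =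
      (a ++ cols.filter (fun w => decide (w ∈ L1)),
       b ++ cols.filter (fun w => decide (w ∈ L2)),
       c ++ cols.filter (fun w => decide (w ∈ L3)),
       d ++ cols.filter (fun w => decide (w ∈ L4 ∨ (w ∉ L1 ∧ w ∉ L2 ∧ w ∉ L3)))) := by
  induction cols generalizing a b c d with
  | nil => simp
  | cons w t ih =>
    by_cases h1 : w ∈ L1 <;> by_cases h2 : w ∈ L2 <;> by_cases h3 : w ∈ L3 <;>
      by_cases h4 : w ∈ L4 <;>
      simp [List.foldl_cons, projectionStep, h1, h2, h3, h4, ih]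

theorem projection_spec_aux (L1 L2 L3 L4 : List String) (Query : String) :
    projection L1 L2 L3 L4 Query = projection_alt L1 L2 L3 L4 Query := by
  unfold projection projection_alt
  rw [projection_loop_eq]
  simp [projectionCols]

-- ===== VERDICT (by name: the statement is the Claim_ definition above) =====
theorem projection_spec : Claim_equal_projection := by
  intro L1 L2 L3 L4 Q _
  exact projection_spec_aux L1 L2 L3 L4 Q
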